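-- pv_equiv track=rewrite | github.com/ahmadazim/DiffuGene | src/DiffuGene/VQVAE/vizHyperparam.py | _split_csv_line_bracket_aware
-- ===== SOURCE A (Python) =====
-- def _split_csv_line_bracket_aware(line: str):
--     line = line.rstrip("\n")
--     parts, buf, depth = [], [], 0
--     for ch in line:
--         if ch == '[':
--             depth += 1
--             buf.append(ch)
--         elif ch == ']':
--             depth = max(0, depth - 1)
--             buf.append(ch)
--         elif ch == ',' and depth == 0:
--             parts.append(''.join(buf).strip())
--             buf = []
--         else:
--             buf.append(ch)
--     parts.append(''.join(buf).strip())
--     return parts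
-- ===== SOURCE B (Python) =====
-- def _split_csv_line_bracket_aware(line: str):
--     # Recursive first-match decomposition: find the first comma at bracket
--     # depth 0, slice around it, and recurse on the remainder.
--     def split0(s):
--         depth = 0
--         for i, ch in enumerate(s):
--             if ch == '[':
--                 depth += 1
--             elif ch == ']':
--                 depth = max(0, depth - 1)
--             elif ch == ',' and depth == 0:
--                 return [s[:i].strip()] + split0(s[i + 1:])
--         return [s.strip()]
--     return split0(line.rstrip("\n"))
-- ===== Notes on version B (the rewrite author's own statement) =====
-- stated objective: alternative
-- what changed: Replaced the single-pass fold that threads a (parts, buf, depth) accumulator with a recursive first-match decomposition: find the first depth-0 comma, slice the string around it, and recurse on the remainder.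
import Mathlib
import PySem

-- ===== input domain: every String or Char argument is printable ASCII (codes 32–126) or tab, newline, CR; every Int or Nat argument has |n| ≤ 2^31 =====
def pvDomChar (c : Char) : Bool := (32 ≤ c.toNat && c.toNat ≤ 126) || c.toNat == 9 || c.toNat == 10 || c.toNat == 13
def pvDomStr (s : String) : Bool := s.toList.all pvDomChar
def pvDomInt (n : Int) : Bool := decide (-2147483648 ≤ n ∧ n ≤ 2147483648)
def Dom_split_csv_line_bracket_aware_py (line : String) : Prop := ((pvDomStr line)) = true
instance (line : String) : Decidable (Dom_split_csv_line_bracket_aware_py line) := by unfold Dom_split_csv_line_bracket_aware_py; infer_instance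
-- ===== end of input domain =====

-- B replaces A's single-pass (parts, buf, depth) accumulator fold with a recursive
-- first-match decomposition (find first depth-0 comma, slice, recurse); alternative, not faster.

-- ===== PORT A =====
-- line.rstrip("\n"): drop trailing '\n' characters (exact; hand-ported, PySem has no rstrip-with-chars)
def pvRstripNL (cs : List Char) : List Char :=
  (cs.reverse.dropWhile (fun c => c = '\n')).reverse

-- one iteration of A's for-loop over state (parts, buf, depth)
def pvAStep (s : List (List Char) × List Char × Int) (ch : Char) :
    List (List Char) × List Char × Int :=
  if ch = '[' then (s.1, s.2.1 ++ [ch], s.2.2 + 1)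
  else if ch = ']' then (s.1, s.2.1 ++ [ch], max 0 (s.2.2 - 1))
  else if ch = ',' ∧ s.2.2 = 0 then (s.1 ++ [PySem.Chars.strip s.2.1], [], s.2.2)
  else (s.1, s.2.1 ++ [ch], s.2.2)

-- the trailing parts.append(''.join(buf).strip())
def pvAFinish (s : List (List Char) × List Char × Int) : List (List Char) :=
  s.1 ++ [PySem.Chars.strip s.2.1]

def split_csv_line_bracket_aware_py (line : String) : List String :=
  (pvAFinish ((pvRstripNL line.toList).foldl pvAStep ([], [], 0))).map String.ofList

-- ===== PORT B =====
-- B's inner for-loop: find the first comma at depth 0; returns (s[:i], s[i+1:]) or none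
def pvBScan : List Char → Int → Option (List Char × List Char)
  | [], _ => none
  | c :: cs, d =>
    if c = '[' then (pvBScan cs (d + 1)).map (fun pq => (c :: pq.1, pq.2))
    else if c = ']' then (pvBScan cs (max 0 (d - 1))).map (fun pq => (c :: pq.1, pq.2))
    else if c = ',' ∧ d = 0 then some ([], cs)
    else (pvBScan cs d).map (fun pq => (c :: pq.1, pq.2))

-- termination lemma for pvBSplit (cited by the port's decreasing_by)
theorem pvBScan_shrink : ∀ (cs : List Char) (d : Int) (p q : List Char),
    pvBScan cs d = some (p, q) → q.length < cs.length := by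
  intro cs
  induction cs with
  | nil => intro d p q h; simp [pvBScan] at h
  | cons c cs ih =>
    intro d p q h
    simp only [pvBScan] at h
    split_ifs at h with h1 h2 h3
    · rcases Option.map_eq_some_iff.mp h with ⟨⟨p', q'⟩, hs, he⟩
      cases he; have := ih _ _ _ hs; simpa using Nat.lt_succ_of_lt this
    · rcases Option.map_eq_some_iff.mp h with ⟨⟨p', q'⟩, hs, he⟩
      cases he; have := ih _ _ _ hs; simpa using Nat.lt_succ_of_lt this
    · cases h; simp
    · rcases Option.map_eq_some_iff.mp h with ⟨⟨p', q'⟩, hs, he⟩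
      cases he; have := ih _ _ _ hs; simpa using Nat.lt_succ_of_lt this

-- B's split0: [s[:i].strip()] + split0(s[i+1:]) at the first depth-0 comma, else [s.strip()]
def pvBSplit (cs : List Char) : List (List Char) :=
  match h : pvBScan cs 0 with
  | none => [PySem.Chars.strip cs]
  | some pq => PySem.Chars.strip pq.1 :: pvBSplit pq.2
termination_by cs.length
decreasing_by exact pvBScan_shrink _ _ _ _ h

def split_csv_line_bracket_aware_py_alt (line : String) : List String :=
  (pvBSplit (pvRstripNL line.toList)).map String.ofList

-- ===== PRECONDITION & SPEC =====
def Spec_split_csv_line_bracket_aware_py (line : String) (out : List String) : Prop := out = split_csv_line_bracket_aware_py_alt line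
instance (line : String) (out : List String) : Decidable (Spec_split_csv_line_bracket_aware_py line out) := by unfold Spec_split_csv_line_bracket_aware_py; infer_instance

-- ===== CLAIM (what is proved, stated in full; the proofs are below) =====
def Claim_equal_split_csv_line_bracket_aware_py : Prop := ∀ (line : String), Dom_split_csv_line_bracket_aware_py line → Spec_split_csv_line_bracket_aware_py line (split_csv_line_bracket_aware_py line)

-- ===== LEMMAS AND PROOFS =====

-- generalized form of pvBSplit carrying A's pending buffer and depth
def pvBSplitGen (buf : List Char) (d : Int) (cs : List Char) : List (List Char) :=
  match pvBScan cs d with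
  | none => [PySem.Chars.strip (buf ++ cs)]
  | some (p, q) => PySem.Chars.strip (buf ++ p) :: pvBSplit q

theorem pvBSplitGen_nil_zero (cs : List Char) : pvBSplitGen [] 0 cs = pvBSplit cs := by
  rw [pvBSplit, pvBSplitGen]
  cases h : pvBScan cs 0 with
  | none => simp
  | some pq => simp

theorem pvMain : ∀ (cs : List Char) (parts : List (List Char)) (buf : List Char) (d : Int),
    pvAFinish (cs.foldl pvAStep (parts, buf, d)) = parts ++ pvBSplitGen buf d cs := by
  intro cs
  induction cs with
  | nil => intro parts buf d; simp [pvAFinish, pvBSplitGen, pvBScan]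
  | cons c cs ih =>
    intro parts buf d
    have hstep : (c :: cs).foldl pvAStep (parts, buf, d) =
        cs.foldl pvAStep (pvAStep (parts, buf, d) c) := rfl
    rw [hstep]
    by_cases h1 : c = '['
    · have hst : pvAStep (parts, buf, d) c = (parts, buf ++ [c], d + 1) := by
        simp [pvAStep, h1]
      rw [hst, ih]
      congr 1
      rw [pvBSplitGen, pvBSplitGen]
      have hsc : pvBScan (c :: cs) d = (pvBScan cs (d + 1)).map (fun pq => (c :: pq.1, pq.2)) := by
        simp [pvBScan, h1]
      rw [hsc]
      cases hs : pvBScan cs (d + 1) with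
      | none => simp
      | some pq => simp
    · by_cases h2 : c = ']'
      · have hst : pvAStep (parts, buf, d) c = (parts, buf ++ [c], max 0 (d - 1)) := by
          simp [pvAStep, h2]
        rw [hst, ih]
        congr 1
        rw [pvBSplitGen, pvBSplitGen]
        have hsc : pvBScan (c :: cs) d = (pvBScan cs (max 0 (d - 1))).map (fun pq => (c :: pq.1, pq.2)) := by
          simp [pvBScan, h2]
        rw [hsc]
        cases hs : pvBScan cs (max 0 (d - 1)) with
        | none => simp
        | some pq => simp
      · by_cases h3 : c = ',' ∧ d = 0
        · obtain ⟨hc, hd⟩ := h3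
          subst hc hd
          have hst : pvAStep (parts, buf, (0 : Int)) ',' = (parts ++ [PySem.Chars.strip buf], [], (0 : Int)) := by
            simp [pvAStep, h2]
          rw [hst, ih, pvBSplitGen_nil_zero]
          have hsc : pvBScan (',' :: cs) 0 = some ([], cs) := by
            simp [pvBScan, h2]
          have hgen : pvBSplitGen buf 0 (',' :: cs) = PySem.Chars.strip buf :: pvBSplit cs := by
            rw [pvBSplitGen, hsc]; simp
          rw [hgen]
          simp
        · have hst : pvAStep (parts, buf, d) c = (parts, buf ++ [c], d) := by
            simp [pvAStep, h1, h2, h3]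
          rw [hst, ih]
          congr 1
          rw [pvBSplitGen, pvBSplitGen]
          have hsc : pvBScan (c :: cs) d = (pvBScan cs d).map (fun pq => (c :: pq.1, pq.2)) := by
            rw [pvBScan, if_neg h1, if_neg h2, if_neg h3]
          rw [hsc]
          cases hs : pvBScan cs d with
          | none => simp
          | some pq => simp

-- ===== VERDICT (by name: the statement is the Claim_ definition above) =====
theorem split_csv_line_bracket_aware_py_spec : Claim_equal_split_csv_line_bracket_aware_py := by
  intro line _
  unfold Spec_split_csv_line_bracket_aware_py split_csv_line_bracket_aware_py split_csv_line_bracket_aware_py_alt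
  rw [pvMain, pvBSplitGen_nil_zero]
  simp
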